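-- pv_equiv track=rewrite | github.com/Martombo/SpliceRatio | splice_ratio.py | _parse_factor
-- ===== SOURCE A (Python) =====
-- def _parse_factor(factor):
--     if not factor:
--         return None
--     samples_dic = {}
--     for i, k in enumerate(factor):
--         if k not in samples_dic:
--             samples_dic[k] = []
--         samples_dic[k].append(i)
--     assert len(samples_dic) > 1
--     return samples_dic
-- ===== SOURCE B (Python) =====
-- def _parse_factor(factor):
--     if not factor:
--         return None
--     keys = list(dict.fromkeys(factor))
--     assert len(keys) > 1
--     return {k: [i for i, v in enumerate(factor) if v == k] for k in keys}
-- ===== Notes on version B (the rewrite author's own statement) =====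
-- stated objective: alternative
-- what changed: Replaces the single-pass append-into-dict grouping by a two-stage strategy: first dedup the values in first-occurrence order (dict.fromkeys), then gather each key's indices with a per-key enumerate/filter comprehension; Pre_ excludes the inputs where A's assert fails (non-empty factor with fewer than two distinct values), where A raises AssertionError.
import Mathlib
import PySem

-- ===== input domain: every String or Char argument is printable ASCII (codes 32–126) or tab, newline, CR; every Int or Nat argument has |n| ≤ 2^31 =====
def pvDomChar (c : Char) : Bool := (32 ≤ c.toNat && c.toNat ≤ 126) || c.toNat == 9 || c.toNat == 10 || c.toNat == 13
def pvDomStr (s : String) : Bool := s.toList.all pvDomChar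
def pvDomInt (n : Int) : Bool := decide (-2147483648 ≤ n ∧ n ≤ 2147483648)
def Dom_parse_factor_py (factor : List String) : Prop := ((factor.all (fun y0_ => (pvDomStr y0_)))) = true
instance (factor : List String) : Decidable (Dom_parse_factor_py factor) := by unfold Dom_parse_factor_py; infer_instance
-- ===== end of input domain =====

-- B replaces A's single-pass append-into-dict grouping by a two-stage pass: ordered dedup of
-- the values, then a per-key enumerate/filter gather (objective: alternative decomposition).

-- ===== PORT A =====
-- loop 'for i, k in enumerate(factor)': conditional insert of [] then append i to samples_dic[k];
-- the failing assert (len(samples_dic) <= 1) raises AssertionError in Python — represented as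
-- none here and excluded by Pre_parse_factor_py.
def parse_factor_py (factor : List String) : Option (List (String × List Int)) :=
  if factor = [] then none
  else
    let d := (PySem.List.enumerate factor).foldl
      (fun d p =>
        let d := if d.contains p.2 then d else d.insert p.2 []
        d.modify p.2 [] (fun l => l ++ [p.1]))
      PySem.Dict.empty
    if 1 < d.size then some d.items else none

-- ===== PORT B =====
-- 'list(dict.fromkeys(factor))' is PySem.List.dedup (first occurrences, in order); the dict
-- comprehension over these distinct keys is the map below; the failing assert is none (see Pre_).
def parse_factor_py_alt (factor : List String) : Option (List (String × List Int)) :=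
  if factor = [] then none
  else
    let keys := PySem.List.dedup factor
    if 1 < keys.length then
      some (keys.map (fun k =>
        (k, ((PySem.List.enumerate factor).filter (fun p => p.2 == k)).map (fun p => p.1))))
    else none

-- ===== PRECONDITION & SPEC =====
-- Pre_ excludes exactly the inputs where A's 'assert len(samples_dic) > 1' fails, i.e. a
-- non-empty factor with fewer than two distinct values: Python A raises AssertionError there.
def Pre_parse_factor_py (factor : List String) : Prop :=
  factor = [] ∨ 1 < (PySem.List.dedup factor).length
instance (factor : List String) : Decidable (Pre_parse_factor_py factor) := by
  unfold Pre_parse_factor_py; infer_instance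
def pvWitness_parse_factor_py : List String := ["a", "b", "a"]
def Spec_parse_factor_py (factor : List String) (out : Option (List (String × List Int))) : Prop :=
  out = parse_factor_py_alt factor
instance (factor : List String) (out : Option (List (String × List Int))) : Decidable (Spec_parse_factor_py factor out) := by unfold Spec_parse_factor_py; infer_instance

-- ===== CLAIM (what is proved, stated in full; the proofs are below) =====
def Claim_equal_parse_factor_py : Prop := ∀ (factor : List String), Dom_parse_factor_py factor → Pre_parse_factor_py factor → Spec_parse_factor_py factor (parse_factor_py factor)

-- ===== LEMMAS AND PROOFS =====

-- A's loop body (conditional insert of [] then append) is a plain Dict.modify.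
theorem pv_step_eq (d : PySem.Dict String (List Int)) (k : String) (i : Int) :
    (if d.contains k then d else d.insert k []).modify k [] (fun l => l ++ [i])
      = d.modify k [] (fun l => l ++ [i]) := by
  by_cases h : d.contains k
  · simp [h]
  · simp only [h, Bool.false_eq_true, ↓reduceIte]
    have hk : ∀ p ∈ d.items, p.1 ≠ k := by
      intro p hp hpk
      have hm : k ∈ d.keys := by
        simp only [PySem.Dict.keys]
        exact List.mem_map.mpr ⟨p, hp, hpk⟩
      rw [← PySem.Dict.contains_iff_mem_keys] at hm
      simp [hm] at h
    have hfind : d.items.find? (fun p => p.1 == k) = none := by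
      rw [List.find?_eq_none]
      intro p hp
      simpa using hk p hp
    apply PySem.Dict.ext
    simp only [PySem.Dict.modify, PySem.Dict.insert, h, Bool.false_eq_true, ↓reduceIte,
      PySem.Dict.contains_mk, List.any_append, List.any_cons, BEq.rfl, List.any_nil,
      Bool.or_false, Bool.or_true, beq_iff_eq, List.map_append, List.map_cons, List.map_nil,
      PySem.Dict.getD, PySem.Dict.get?, List.find?_append, hfind]
    simp only [Option.none_or, List.find?_cons, BEq.rfl]
    rw [List.map_congr_left (g := id) ?side, List.map_id]
    · simp
    case side =>
      intro p hp
      simp [hk p hp]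

-- The items of A's fold are exactly B's dedup-keyed gather.
theorem pv_items_eq (factor : List String) :
    ((PySem.List.enumerate factor).foldl
      (fun d p =>
        let d := if d.contains p.2 then d else d.insert p.2 []
        d.modify p.2 [] (fun l => l ++ [p.1]))
      PySem.Dict.empty).items
    = (PySem.List.dedup factor).map (fun k =>
        (k, ((PySem.List.enumerate factor).filter (fun p => p.2 == k)).map (fun p => p.1))) := by
  have hc : (PySem.List.enumerate factor).foldl
      (fun d p =>
        let d := if d.contains p.2 then d else d.insert p.2 []
        d.modify p.2 [] (fun l => l ++ [p.1]))
      PySem.Dict.empty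
    = (PySem.List.enumerate factor).foldl
      (fun d p => d.modify p.2 [] (fun l => l ++ [p.1])) PySem.Dict.empty := by
    apply PySem.List.foldl_congr_mem
    intro acc x _
    exact pv_step_eq acc x.2 x.1
  rw [hc]
  set D := (PySem.List.enumerate factor).foldl
      (fun d p => d.modify p.2 [] (fun l => l ++ [p.1])) PySem.Dict.empty with hD
  have hkeys : D.keys = PySem.List.dedup factor := by
    rw [hD, PySem.Dict.keys_foldl_modify_key]
    simp [PySem.List.map_snd_enumerate, PySem.Set.update_nil_left]
  have hnodup : D.keys.Nodup := by
    rw [hkeys]; exact PySem.List.nodup_dedup factor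
  have hget : ∀ c, D.getD c [] =
      ((PySem.List.enumerate factor).filter (fun p => p.2 == c)).map (fun p => p.1) := by
    intro c
    have hswap : D = ((PySem.List.enumerate factor).map Prod.swap).foldl
        (fun d p => d.modify p.1 [] (fun l => l ++ [p.2])) PySem.Dict.empty := by
      rw [hD, List.foldl_map]
      rfl
    rw [hswap, PySem.Dict.getD_foldl_modify_append]
    simp [List.filter_map, List.map_map, Function.comp_def]
  rw [PySem.Dict.items_eq_map_keys D hnodup [], hkeys]
  exact List.map_congr_left (fun k _ => by rw [hget k])

-- ===== VERDICT (by name: the statement is the Claim_ definition above) =====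
theorem parse_factor_py_spec : Claim_equal_parse_factor_py := by
  intro factor _ _
  unfold Spec_parse_factor_py parse_factor_py parse_factor_py_alt
  by_cases hnil : factor = []
  · simp [hnil]
  · simp only [hnil, ↓reduceIte]
    rw [show PySem.Dict.size = fun (d : PySem.Dict String (List Int)) => d.items.length from rfl]
    simp only [pv_items_eq factor, List.length_map]
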